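-- pv_equiv track=rewrite | github.com/solacode-SC/codewars | sum_for_list.py | fix_dup
-- ===== SOURCE A (Python) =====
-- def fix_dup(lst):
--     result = []
--     for i in range(len(lst)):
--         found = False
--         for j in range(len(result)):
--             if lst[i][0] == result[j][0]:
--                 result[j][1] += lst[i][1]
--                 found = True
--                 break
--         if not found:
--             result.append(lst[i])
--     return sorted(result)
-- ===== SOURCE B (Python) =====
-- def fix_dup(lst):
--     out = []
--     for x in sorted(lst, key=lambda v: v[0]):
--         if out and out[-1][0] == x[0]:
--             out[-1][1] += x[1]
--         else:
--             out.append(x[:])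
--     return out
-- ===== Notes on version B (the rewrite author's own statement) =====
-- stated objective: alternative
-- what changed: B replaces A's find-or-insert scan of the accumulated result plus a final sort by a different algorithm: sort the input once by first element (stable) and merge adjacent equal-key runs in a single pass, with no final sort.
-- outside the precondition, e.g. on fix_dup([[]]): A returns [[]], B raises IndexError
import Mathlib
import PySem

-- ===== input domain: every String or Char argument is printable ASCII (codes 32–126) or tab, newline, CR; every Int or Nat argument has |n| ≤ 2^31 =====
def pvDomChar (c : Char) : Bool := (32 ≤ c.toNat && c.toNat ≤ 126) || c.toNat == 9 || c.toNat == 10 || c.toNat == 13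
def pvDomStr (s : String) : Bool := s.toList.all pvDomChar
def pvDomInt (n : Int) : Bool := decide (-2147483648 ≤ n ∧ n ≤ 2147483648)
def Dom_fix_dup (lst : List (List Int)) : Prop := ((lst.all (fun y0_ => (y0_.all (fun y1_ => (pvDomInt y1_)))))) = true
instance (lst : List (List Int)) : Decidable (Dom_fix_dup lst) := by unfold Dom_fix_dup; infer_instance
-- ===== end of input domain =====

-- B is a different algorithm: sort the input by first element once (stable), then merge ADJACENT
-- equal-key runs in one linear scan — no final sort and no scan of the accumulated result; the
-- equivalence is about the RETURN value only (Python A mutates the input's inner lists in place,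
-- B does not).

-- ===== PORT A =====
-- inner `for j in range(len(result))` scan with break/append; lst[i][0], result[j][0], result[j][1]
-- read via getD (exact under Pre_, which guarantees the indices are in range exactly where Python reads them)
def fix_dup_inner (x : List Int) : List (List Int) → List (List Int)
  | [] => [x]
  | r :: rs =>
    if x.getD 0 0 = r.getD 0 0 then (r.set 1 (r.getD 1 0 + x.getD 1 0)) :: rs
    else r :: fix_dup_inner x rs

def fix_dup (lst : List (List Int)) : List (List Int) :=
  PySem.List.sorted (lst.foldl (fun result x => fix_dup_inner x result) []) (fun v => v) false

-- ===== PORT B =====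
-- Source B's single loop over sorted(lst, key=v[0]): `out and out[-1][0] == x[0]` is the getLast? match,
-- `out[-1][1] += x[1]` replaces the last element, `out.append(x[:])` appends
def fix_dup_alt (lst : List (List Int)) : List (List Int) :=
  (PySem.List.sorted lst (fun v => v.getD 0 0) false).foldl
    (fun out x =>
      match out.getLast? with
      | some r =>
        if r.getD 0 0 = x.getD 0 0 then
          out.dropLast ++ [r.set 1 (r.getD 1 0 + x.getD 1 0)]
        else out ++ [x]
      | none => out ++ [x]) []

-- ===== PRECONDITION & SPEC =====
-- Pre_ excludes exactly the inputs on which Python A raises IndexError (an empty inner list reached by a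
-- comparison, or two lists sharing a first element one of which lacks a second element), plus the single
-- one-element input whose only inner list is empty, where A returns it unchanged (the comparison is never
-- reached) but my B itself raises IndexError reading the sort key.
def Pre_fix_dup (lst : List (List Int)) : Prop :=
  (∀ x ∈ lst, x ≠ []) ∧
  List.Pairwise (fun x y => x.getD 0 0 = y.getD 0 0 → 2 ≤ x.length ∧ 2 ≤ y.length) lst
instance (lst : List (List Int)) : Decidable (Pre_fix_dup lst) := by unfold Pre_fix_dup; infer_instance

def pvWitness_fix_dup : List (List Int) := [[1, 2], [1, 3], [2, 5], [0]]

def Spec_fix_dup (lst : List (List Int)) (out : List (List Int)) : Prop := out = fix_dup_alt lst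
instance (lst : List (List Int)) (out : List (List Int)) : Decidable (Spec_fix_dup lst out) := by unfold Spec_fix_dup; infer_instance

-- ===== CLAIM (what is proved, stated in full; the proofs are below) =====
def Claim_equal_fix_dup : Prop := ∀ (lst : List (List Int)), Dom_fix_dup lst → Pre_fix_dup lst → Spec_fix_dup lst (fix_dup lst)

-- ===== LEMMAS AND PROOFS =====

-- the key of an entry, the merge step, and the canonical form both programs compute
def pvKey (x : List Int) : Int := x.getD 0 0
def pvBump (r z : List Int) : List Int := r.set 1 (r.getD 1 0 + z.getD 1 0)
-- the merged entry for key k: first occurrence with the later values folded in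
def pvRep (l : List (List Int)) (k : Int) : List Int :=
  match l.filter (fun z => pvKey z == k) with
  | [] => []
  | f :: t => t.foldl pvBump f
-- one merged entry per key, keys in first-occurrence order
def pvCanon (l : List (List Int)) : List (List Int) :=
  (PySem.List.dedup (l.map pvKey)).map (pvRep l)
-- B's adjacent-run merge, recursively
def pvMerge (r : List Int) : List (List Int) → List (List Int)
  | [] => [r]
  | x :: ys => if pvKey r = pvKey x then pvMerge (pvBump r x) ys else r :: pvMerge x ys

-- B's loop body, named for the proofs
def pvStep (out : List (List Int)) (x : List Int) : List (List Int) :=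
  match out.getLast? with
  | some r =>
    if r.getD 0 0 = x.getD 0 0 then
      out.dropLast ++ [r.set 1 (r.getD 1 0 + x.getD 1 0)]
    else out ++ [x]
  | none => out ++ [x]

theorem pvStep_eq_some {out : List (List Int)} {r : List Int} (h : out.getLast? = some r)
    (x : List Int) :
    pvStep out x =
      if r.getD 0 0 = x.getD 0 0 then
        out.dropLast ++ [r.set 1 (r.getD 1 0 + x.getD 1 0)]
      else out ++ [x] := by
  unfold pvStep
  rw [h]

theorem pvRep_eq {l : List (List Int)} {k : Int} {f : List Int} {t : List (List Int)}
    (hf : l.filter (fun z => pvKey z == k) = f :: t) : pvRep l k = t.foldl pvBump f := by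
  unfold pvRep
  rw [hf]

theorem pvRep_congr {l l' : List (List Int)} {k : Int}
    (h : l.filter (fun z => pvKey z == k) = l'.filter (fun z => pvKey z == k)) :
    pvRep l k = pvRep l' k := by
  unfold pvRep
  rw [h]

theorem pvKey_bump (r z : List Int) : pvKey (pvBump r z) = pvKey r := by
  simp [pvKey, pvBump]

theorem pvKey_foldl_bump (t : List (List Int)) : ∀ f, pvKey (t.foldl pvBump f) = pvKey f := by
  induction t with
  | nil => intro f; rfl
  | cons z t ih => intro f; rw [List.foldl_cons, ih, pvKey_bump]

theorem foldl_bump_ne_nil (t : List (List Int)) : ∀ f, f ≠ [] → t.foldl pvBump f ≠ [] := by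
  induction t with
  | nil => intro f h; exact h
  | cons z t ih =>
    intro f h
    refine ih _ ?_
    intro hc
    simp only [pvBump] at hc
    exact h ((List.set_eq_nil_iff _ _).mp hc)

theorem pvFilter_ne_nil (l : List (List Int)) (k : Int) (h : ∃ z ∈ l, pvKey z = k) :
    l.filter (fun z => pvKey z == k) ≠ [] := by
  simp only [ne_eq, List.filter_eq_nil_iff, not_forall]
  obtain ⟨z, hz, hk⟩ := h
  exact ⟨z, hz, by simp [hk]⟩

theorem pvRep_key (l : List (List Int)) (k : Int) (h : ∃ z ∈ l, pvKey z = k) :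
    pvKey (pvRep l k) = k := by
  cases hf : l.filter (fun z => pvKey z == k) with
  | nil => exact absurd hf (pvFilter_ne_nil l k h)
  | cons f t =>
    have hfk : pvKey f = k := by
      have := List.of_mem_filter (hf ▸ List.mem_cons_self)
      simpa using this
    rw [pvRep_eq hf, pvKey_foldl_bump, hfk]

theorem pvRep_ne_nil (l : List (List Int)) (k : Int) (h : ∃ z ∈ l, pvKey z = k)
    (hne : ∀ x ∈ l, x ≠ []) : pvRep l k ≠ [] := by
  cases hf : l.filter (fun z => pvKey z == k) with
  | nil => exact absurd hf (pvFilter_ne_nil l k h)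
  | cons f t =>
    have : f ∈ l := List.mem_of_mem_filter (hf ▸ List.mem_cons_self)
    rw [pvRep_eq hf]
    exact foldl_bump_ne_nil t f (hne f this)

-- dedup is a sublist (first occurrences, in order)
theorem pvDedup_sublist (xs : List Int) : (PySem.Set.ofList xs).Sublist xs := by
  induction xs with
  | nil => simp [PySem.Set.ofList]
  | cons x xs ih =>
    rw [PySem.Set.ofList_cons]
    exact List.Sublist.cons₂ x (List.Sublist.trans List.filter_sublist ih)

theorem pvDedup_cons_of_not_mem (a : Int) (as : List Int) (h : a ∉ as) :
    PySem.List.dedup (a :: as) = a :: PySem.List.dedup as := by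
  simp only [PySem.List.dedup_eq_ofList, PySem.Set.ofList_cons]
  congr 1
  apply List.filter_eq_self.mpr
  intro b hb
  have hbm : b ∈ as := (PySem.Set.mem_ofList as b).mp hb
  have : (b == a) = false := beq_eq_false_iff_ne.mpr (fun hba => h (hba ▸ hbm))
  simp [this]

theorem pvOfList_cons_cons (k : Int) (rest : List Int) :
    PySem.Set.ofList (k :: k :: rest) = PySem.Set.ofList (k :: rest) := by
  simp [PySem.Set.ofList_cons, PySem.Set.discard, List.filter_filter]

-- ===== A-side characterization =====

theorem innerA_not_mem (x : List Int) (L : List (List Int))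
    (h : pvKey x ∉ L.map pvKey) : fix_dup_inner x L = L ++ [x] := by
  induction L with
  | nil => simp [fix_dup_inner]
  | cons r rs ih =>
    simp only [List.map_cons, List.mem_cons, not_or] at h
    unfold fix_dup_inner
    rw [if_neg (by simpa [pvKey] using h.1), ih h.2]
    rfl

theorem innerA_mem (x : List Int) (ks : List Int) (f : Int → List Int)
    (hnd : ks.Nodup) (hkey : ∀ k ∈ ks, pvKey (f k) = k) (hm : pvKey x ∈ ks) :
    fix_dup_inner x (ks.map f) =
      ks.map (fun k => if k = pvKey x then pvBump (f k) x else f k) := by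
  induction ks with
  | nil => simp at hm
  | cons k ks ih =>
    have hfk : (f k).getD 0 0 = k := hkey k List.mem_cons_self
    simp only [List.map_cons]
    by_cases hk : pvKey x = k
    · unfold fix_dup_inner
      rw [if_pos (show x.getD 0 0 = (f k).getD 0 0 by rw [hfk]; exact hk)]
      have hcongr : ∀ k' ∈ ks, (if k' = pvKey x then pvBump (f k') x else f k') = f k' := by
        intro k' hk'
        rw [if_neg]
        intro he
        subst he
        rw [hk] at hk'
        exact (List.nodup_cons.mp hnd).1 hk'
      rw [List.map_congr_left hcongr, if_pos hk.symm]
      rfl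
    · unfold fix_dup_inner
      rw [if_neg (show ¬ x.getD 0 0 = (f k).getD 0 0 by rw [hfk]; exact hk)]
      have hm' : pvKey x ∈ ks := by
        rcases List.mem_cons.mp hm with h | h
        · exact absurd h hk
        · exact h
      rw [ih (List.nodup_cons.mp hnd).2 (fun k' hk' => hkey k' (List.mem_cons_of_mem _ hk')) hm',
        if_neg (fun h => hk h.symm)]

theorem canonA (lst : List (List Int)) :
    lst.foldl (fun result x => fix_dup_inner x result) [] = pvCanon lst := by
  induction lst using List.reverseRecOn with
  | nil => rfl
  | append_singleton l x ih =>
    rw [List.foldl_append, List.foldl_cons, List.foldl_nil, ih]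
    unfold pvCanon
    simp only [List.map_append, List.map_cons, List.map_nil,
      PySem.List.dedup_eq_ofList, PySem.Set.ofList_append_singleton]
    have hkeys : ∀ k ∈ PySem.Set.ofList (l.map pvKey), ∃ z ∈ l, pvKey z = k := by
      intro k hk
      have : k ∈ l.map pvKey := (PySem.Set.mem_ofList _ _).mp hk
      obtain ⟨z, hz, hzk⟩ := List.mem_map.mp this
      exact ⟨z, hz, hzk⟩
    by_cases hm : pvKey x ∈ PySem.Set.ofList (l.map pvKey)
    · -- key already present: inner bumps the matching entry, the key list is unchanged
      rw [PySem.Set.add_of_mem hm]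
      rw [innerA_mem x _ (pvRep l) (PySem.Set.nodup_ofList _)
        (fun k hk => pvRep_key l k (hkeys k hk)) hm]
      apply List.map_congr_left
      intro k hk
      by_cases hke : k = pvKey x
      · rw [if_pos hke]
        cases hf : l.filter (fun z => pvKey z == k) with
        | nil => exact absurd hf (pvFilter_ne_nil l k (hkeys k hk))
        | cons f t =>
          have hf' : (l ++ [x]).filter (fun z => pvKey z == k) = f :: (t ++ [x]) := by
            rw [List.filter_append, hf]
            have hx : List.filter (fun z => pvKey z == k) [x] = [x] := by simp [hke]
            rw [hx]
            rfl
          rw [pvRep_eq hf, pvRep_eq hf', List.foldl_append, List.foldl_cons, List.foldl_nil]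
      · rw [if_neg hke]
        apply pvRep_congr
        rw [List.filter_append]
        have hx : List.filter (fun z => pvKey z == k) [x] = [] := by
          simp only [List.filter_cons, List.filter_nil]
          rw [if_neg (by simpa using fun h : pvKey x = k => hke h.symm)]
        rw [hx, List.append_nil]
    · -- fresh key: inner appends, the key list gains pvKey x at the end
      rw [PySem.Set.add_of_not_mem hm]
      rw [innerA_not_mem x _ (by
        intro hc
        apply hm
        obtain ⟨e, he, hek⟩ := List.mem_map.mp hc
        obtain ⟨k, hk, rfl⟩ := List.mem_map.mp he
        rw [pvRep_key l k (hkeys k hk)] at hek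
        rw [← hek]; exact hk)]
      rw [List.map_append, List.map_cons, List.map_nil]
      have hfl : l.filter (fun z => pvKey z == pvKey x) = [] := by
        apply List.filter_eq_nil_iff.mpr
        intro z hz
        simp only [beq_iff_eq]
        intro hzk
        exact hm ((PySem.Set.mem_ofList _ _).mpr (List.mem_map.mpr ⟨z, hz, hzk⟩))
      congr 1
      · apply List.map_congr_left
        intro k hk
        have hke : pvKey x ≠ k := fun h => hm (h ▸ hk)
        symm
        apply pvRep_congr
        rw [List.filter_append]
        have hx : List.filter (fun z => pvKey z == k) [x] = [] := by
          simp only [List.filter_cons, List.filter_nil]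
          rw [if_neg (by simpa using hke)]
        rw [hx, List.append_nil]
      · have hfx : (l ++ [x]).filter (fun z => pvKey z == pvKey x) = [x] := by
          rw [List.filter_append, hfl, List.nil_append]
          simp
        rw [pvRep_eq hfx]
        rfl

-- ===== B-side characterization =====

theorem pvStep_shift (ys : List (List Int)) : ∀ (a l : List (List Int)), l ≠ [] →
    ys.foldl pvStep (a ++ l) = a ++ ys.foldl pvStep l := by
  induction ys with
  | nil => intro a l _; rfl
  | cons x ys ih =>
    intro a l hl
    rcases List.eq_nil_or_concat l with rfl | ⟨l', r, hlr⟩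
    · exact absurd rfl hl
    rw [List.concat_eq_append] at hlr
    subst hlr
    rw [List.foldl_cons, List.foldl_cons]
    have hg : (a ++ (l' ++ [r])).getLast? = some r := by simp
    have hg2 : (l' ++ [r]).getLast? = some r := by simp
    rw [pvStep_eq_some hg, pvStep_eq_some hg2]
    by_cases hc : r.getD 0 0 = x.getD 0 0
    · rw [if_pos hc, if_pos hc]
      have hd : (a ++ (l' ++ [r])).dropLast = a ++ l' := by simp
      have hd2 : (l' ++ [r]).dropLast = l' := by simp
      rw [hd, hd2, List.append_assoc]
      exact ih a (l' ++ [r.set 1 (r.getD 1 0 + x.getD 1 0)]) (by simp)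
    · rw [if_neg hc, if_neg hc, List.append_assoc]
      exact ih a ((l' ++ [r]) ++ [x]) (by simp)

theorem pvStep_singleton (ys : List (List Int)) : ∀ r,
    ys.foldl pvStep [r] = pvMerge r ys := by
  induction ys with
  | nil => intro r; rfl
  | cons x ys ih =>
    intro r
    rw [List.foldl_cons, pvStep_eq_some (show ([r] : List (List Int)).getLast? = some r from rfl)]
    by_cases hc : r.getD 0 0 = x.getD 0 0
    · rw [if_pos hc]
      rw [show ([r] : List (List Int)).dropLast ++ [r.set 1 (r.getD 1 0 + x.getD 1 0)] =
        [pvBump r x] from rfl, ih]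
      simp only [pvMerge]
      rw [if_pos (show pvKey r = pvKey x from hc)]
    · rw [if_neg hc, pvStep_shift ys [r] [x] (by simp), ih]
      simp only [pvMerge]
      rw [if_neg (show ¬ pvKey r = pvKey x from hc)]
      rfl

theorem canonB (ys : List (List Int)) : ∀ r,
    (r :: ys).Pairwise (fun a b => pvKey a ≤ pvKey b) →
    pvMerge r ys = pvCanon (r :: ys) := by
  induction ys with
  | nil =>
    intro r _
    simp only [pvMerge, pvCanon, List.map_cons, List.map_nil, PySem.List.dedup_eq_ofList]
    rw [show PySem.Set.ofList [pvKey r] = [pvKey r] from rfl]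
    rw [List.map_cons, List.map_nil]
    rw [pvRep_eq (show List.filter (fun z => pvKey z == pvKey r) [r] = r :: [] by simp)]
    rfl
  | cons x ys ih =>
    intro r hp
    have hp1 : ∀ z ∈ x :: ys, pvKey r ≤ pvKey z := (List.pairwise_cons.mp hp).1
    have hp2 : (x :: ys).Pairwise (fun a b => pvKey a ≤ pvKey b) := (List.pairwise_cons.mp hp).2
    by_cases hk : pvKey r = pvKey x
    · -- merge the head into r, recurse on the combined entry
      have hmg : pvMerge r (x :: ys) = pvMerge (pvBump r x) ys := by
        simp only [pvMerge]; rw [if_pos hk]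
      have hp' : (pvBump r x :: ys).Pairwise (fun a b => pvKey a ≤ pvKey b) := by
        rw [List.pairwise_cons]
        exact ⟨fun z hz => (pvKey_bump r x) ▸ hp1 z (List.mem_cons_of_mem _ hz),
          (List.pairwise_cons.mp hp2).2⟩
      rw [hmg, ih (pvBump r x) hp']
      -- pvCanon (pvBump r x :: ys) = pvCanon (r :: x :: ys)
      unfold pvCanon
      have hkeq : (pvBump r x :: ys).map pvKey = pvKey r :: ys.map pvKey := by
        rw [List.map_cons, pvKey_bump]
      have hkeq2 : (r :: x :: ys).map pvKey = pvKey r :: pvKey r :: ys.map pvKey := by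
        rw [List.map_cons, List.map_cons, ← hk]
      rw [hkeq, hkeq2]
      simp only [PySem.List.dedup_eq_ofList]
      rw [pvOfList_cons_cons]
      apply List.map_congr_left
      intro k' _
      by_cases hke : pvKey r = k'
      · -- the merged key: both runs fold the same values
        have h1 : List.filter (fun z => pvKey z == k') (pvBump r x :: ys) =
            pvBump r x :: List.filter (fun z => pvKey z == k') ys := by
          rw [List.filter_cons, if_pos (by simp [pvKey_bump, hke])]
        have h2 : List.filter (fun z => pvKey z == k') (r :: x :: ys) =
            r :: x :: List.filter (fun z => pvKey z == k') ys := by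
          rw [List.filter_cons, if_pos (by simp [hke]),
            List.filter_cons, if_pos (by simp [← hk, hke])]
        rw [pvRep_eq h1, pvRep_eq h2, List.foldl_cons]
      · -- another key: r, x, and the merged entry are all filtered out
        apply pvRep_congr
        have h1 : List.filter (fun z => pvKey z == k') (pvBump r x :: ys) =
            List.filter (fun z => pvKey z == k') ys := by
          rw [List.filter_cons, if_neg (by simp [pvKey_bump]; exact hke)]
        have h2 : List.filter (fun z => pvKey z == k') (r :: x :: ys) =
            List.filter (fun z => pvKey z == k') ys := by
          rw [List.filter_cons, if_neg (by simp; exact hke),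
            List.filter_cons, if_neg (by simp [← hk]; exact hke)]
        rw [h1, h2]
    · -- r's run is over: emit r, recurse
      have hlt : ∀ z ∈ x :: ys, pvKey r < pvKey z := by
        intro z hz
        rcases List.mem_cons.mp hz with rfl | hz'
        · exact lt_of_le_of_ne (hp1 z List.mem_cons_self) hk
        · exact lt_of_lt_of_le (lt_of_le_of_ne (hp1 x List.mem_cons_self) hk)
            ((List.pairwise_cons.mp hp2).1 z hz')
      have hmg : pvMerge r (x :: ys) = r :: pvMerge x ys := by
        simp only [pvMerge]; rw [if_neg hk]
      rw [hmg, ih x hp2]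
      unfold pvCanon
      have hnm : pvKey r ∉ (x :: ys).map pvKey := by
        intro hc
        obtain ⟨z, hz, hzk⟩ := List.mem_map.mp hc
        exact absurd hzk.symm (ne_of_lt (hlt z hz))
      rw [List.map_cons (f := pvKey) (a := r), pvDedup_cons_of_not_mem _ _ hnm,
        List.map_cons]
      congr 1
      · -- the head entry is r itself
        have h2 : List.filter (fun z => pvKey z == pvKey r) (r :: x :: ys) = r :: [] := by
          rw [List.filter_cons, if_pos (by simp)]
          rw [List.filter_eq_nil_iff.mpr (fun z hz => by
            simp only [beq_iff_eq]
            exact fun hzk => absurd hzk.symm (ne_of_lt (hlt z hz)))]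
        rw [pvRep_eq h2]
        rfl
      · apply List.map_congr_left
        intro k' hk'
        have hk'' : k' ∈ (x :: ys).map pvKey := by
          have h0 := hk'
          simp only [PySem.List.dedup_eq_ofList] at h0
          exact (PySem.Set.mem_ofList _ _).mp h0
        have hkne : pvKey r ≠ k' := by
          intro hc
          obtain ⟨z, hz, hzk⟩ := List.mem_map.mp hk''
          have := hlt z hz
          rw [hzk, ← hc] at this
          exact lt_irrefl _ this
        symm
        apply pvRep_congr
        rw [List.filter_cons (x := r), if_neg (by simpa using hkne)]

-- ===== stability of the sort =====

theorem filter_insertBy (ys : List (List Int)) (x : List Int) (k : Int)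
    (hp : ys.Pairwise (fun a b => pvKey a ≤ pvKey b)) :
    (PySem.List.insertBy (fun a b => decide (pvKey a < pvKey b)) x ys).filter
        (fun z => pvKey z == k) =
      ys.filter (fun z => pvKey z == k) ++ if pvKey x == k then [x] else [] := by
  induction ys with
  | nil =>
    simp only [PySem.List.insertBy, List.filter_nil, List.nil_append, List.filter_cons,
      List.filter_nil]
  | cons y ys ih =>
    have hp1 : ∀ z ∈ ys, pvKey y ≤ pvKey z := (List.pairwise_cons.mp hp).1
    have hp2 : ys.Pairwise (fun a b => pvKey a ≤ pvKey b) := (List.pairwise_cons.mp hp).2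
    simp only [PySem.List.insertBy]
    by_cases hlt : pvKey x < pvKey y
    · rw [if_pos (by simpa using hlt)]
      by_cases hxk : pvKey x = k
      · -- x's key: nothing of y :: ys carries it (all keys are ≥ pvKey y > pvKey x)
        have hnil : (y :: ys).filter (fun z => pvKey z == k) = [] := by
          apply List.filter_eq_nil_iff.mpr
          intro z hz
          simp only [beq_iff_eq]
          intro hzk
          rcases List.mem_cons.mp hz with rfl | hz'
          · exact absurd (hxk.trans hzk.symm) (ne_of_lt hlt)
          · exact absurd (hxk.trans hzk.symm) (ne_of_lt (lt_of_lt_of_le hlt (hp1 z hz')))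
        rw [List.filter_cons (x := x), if_pos (by simpa using hxk), hnil,
          if_pos (by simpa using hxk)]
        rfl
      · rw [List.filter_cons (x := x), if_neg (by simpa using hxk),
          if_neg (by simpa using hxk), List.append_nil]
    · rw [if_neg (by simpa using hlt)]
      by_cases hyk : pvKey y = k
      · rw [List.filter_cons (x := y), List.filter_cons (x := y),
          if_pos (by simpa using hyk), if_pos (by simpa using hyk), ih hp2, List.cons_append]
      · rw [List.filter_cons (x := y), List.filter_cons (x := y),
          if_neg (by simpa using hyk), if_neg (by simpa using hyk), ih hp2]

theorem filter_sorted (lst : List (List Int)) (k : Int) :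
    (PySem.List.sorted lst pvKey false).filter (fun z => pvKey z == k) =
      lst.filter (fun z => pvKey z == k) := by
  induction lst using List.reverseRecOn with
  | nil => rfl
  | append_singleton l x ih =>
    have hins : PySem.List.sorted (l ++ [x]) pvKey false =
        PySem.List.insertBy (fun a b => decide (pvKey a < pvKey b)) x
          (PySem.List.sorted l pvKey false) := by
      rw [PySem.List.sorted_eq_foldl_insertBy, PySem.List.sorted_eq_foldl_insertBy,
        List.foldl_append, List.foldl_cons, List.foldl_nil]
    rw [hins, filter_insertBy _ _ _ (PySem.List.sorted_pairwise l pvKey), ih,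
      List.filter_append]
    congr 1
    rw [List.filter_cons, List.filter_nil]

-- ===== main proof =====

theorem fix_dup_spec' (lst : List (List Int)) (hpre : Pre_fix_dup lst) :
    fix_dup lst = fix_dup_alt lst := by
  obtain ⟨hne, _⟩ := hpre
  unfold fix_dup fix_dup_alt
  rw [canonA]
  rw [show (fun v : List Int => v.getD 0 0) = pvKey from rfl]
  rw [show (fun (out : List (List Int)) (x : List Int) =>
      match out.getLast? with
      | some r =>
        if r.getD 0 0 = x.getD 0 0 then
          out.dropLast ++ [r.set 1 (r.getD 1 0 + x.getD 1 0)]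
        else out ++ [x]
      | none => out ++ [x]) = pvStep from rfl]
  cases hys : PySem.List.sorted lst pvKey false with
  | nil =>
    have hnil : lst = [] := (PySem.List.sorted_eq_nil_iff lst pvKey false).mp hys
    subst hnil
    rfl
  | cons y ys =>
    rw [List.foldl_cons, show pvStep [] y = [y] from rfl, pvStep_singleton,
      canonB ys y (hys ▸ PySem.List.sorted_pairwise lst pvKey)]
    -- replace the reps over the sorted list by reps over lst (stability of the sort)
    have hstab : ∀ k, pvRep (y :: ys) k = pvRep lst k := by
      intro k
      apply pvRep_congr
      rw [← hys, filter_sorted]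
    unfold pvCanon
    rw [List.map_congr_left (fun k _ => hstab k)]
    have hmem : ∀ k : Int, (k ∈ PySem.List.dedup ((y :: ys).map pvKey)) ↔
        (k ∈ PySem.List.dedup (lst.map pvKey)) := by
      intro k
      simp only [PySem.List.dedup_eq_ofList, PySem.Set.mem_ofList, List.mem_map]
      constructor
      · rintro ⟨z, hz, rfl⟩
        exact ⟨z, (PySem.List.mem_sorted lst pvKey false z).mp (hys ▸ hz), rfl⟩
      · rintro ⟨z, hz, rfl⟩
        exact ⟨z, hys ▸ (PySem.List.mem_sorted lst pvKey false z).mpr hz, rfl⟩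
    have hocc : ∀ k : Int, k ∈ PySem.List.dedup ((y :: ys).map pvKey) →
        ∃ z ∈ lst, pvKey z = k := by
      intro k hk
      have h0 := (hmem k).mp hk
      simp only [PySem.List.dedup_eq_ofList] at h0
      exact List.mem_map.mp ((PySem.Set.mem_ofList _ _).mp h0)
    have hperm : (List.map (pvRep lst) (PySem.List.dedup ((y :: ys).map pvKey))).Perm
        (List.map (pvRep lst) (PySem.List.dedup (lst.map pvKey))) := by
      apply List.Perm.map
      apply (List.perm_ext_iff_of_nodup ?_ ?_).mpr
      · exact hmem
      · simp only [PySem.List.dedup_eq_ofList]; exact PySem.Set.nodup_ofList _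
      · simp only [PySem.List.dedup_eq_ofList]; exact PySem.Set.nodup_ofList _
    have hpair : (List.map (pvRep lst) (PySem.List.dedup ((y :: ys).map pvKey))).Pairwise
        (· < ·) := by
      have hks : (PySem.List.dedup ((y :: ys).map pvKey)).Pairwise (· < ·) := by
        have hle : (PySem.List.dedup ((y :: ys).map pvKey)).Pairwise (· ≤ ·) := by
          apply List.Pairwise.sublist (by
            simpa [PySem.List.dedup_eq_ofList] using pvDedup_sublist ((y :: ys).map pvKey))
          have h0 := PySem.List.sorted_map_key_pairwise lst pvKey
          rw [hys] at h0
          exact h0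
        have hnd : (PySem.List.dedup ((y :: ys).map pvKey)).Pairwise (· ≠ ·) := by
          simp only [PySem.List.dedup_eq_ofList]
          exact PySem.Set.nodup_ofList _
        exact (hle.and hnd).imp (fun h => lt_of_le_of_ne h.1 h.2)
      rw [List.pairwise_map]
      refine hks.imp_of_mem ?_
      intro a b ha hb hab
      obtain ⟨ta, hta⟩ : ∃ t, pvRep lst a = a :: t := by
        have h1 := pvRep_ne_nil lst a (hocc a ha) hne
        have h2 := pvRep_key lst a (hocc a ha)
        cases hr : pvRep lst a with
        | nil => exact absurd hr h1
        | cons c t =>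
          rw [hr] at h2
          exact ⟨t, by rw [show pvKey (c :: t) = c from rfl] at h2; rw [h2]⟩
      obtain ⟨tb, htb⟩ : ∃ t, pvRep lst b = b :: t := by
        have h1 := pvRep_ne_nil lst b (hocc b hb) hne
        have h2 := pvRep_key lst b (hocc b hb)
        cases hr : pvRep lst b with
        | nil => exact absurd hr h1
        | cons c t =>
          rw [hr] at h2
          exact ⟨t, by rw [show pvKey (c :: t) = c from rfl] at h2; rw [h2]⟩
      rw [hta, htb]
      exact List.Lex.rel hab
    rw [Subsingleton.elim (fun (a b : List ℤ) => a.decidableLT b)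
      (@LinearOrder.toDecidableLT _ List.instLinearOrder)]
    exact PySem.List.sorted_eq_of_perm_of_pairwise_lt _ _ (fun v => v) hperm hpair

-- ===== VERDICT (by name: the statement is the Claim_ definition above) =====
theorem fix_dup_spec : Claim_equal_fix_dup := by
  intro lst _ hpre
  unfold Spec_fix_dup
  exact fix_dup_spec' lst hpre
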